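-- pv_equiv track=rewrite | github.com/reason515/text-wow | fix_remaining_syntax.py | find_unclosed_structure
-- ===== SOURCE A (Python) =====
-- def find_unclosed_structure(start_line, end_line, lines):
--     """查找未闭合的结构"""
--     brace_count = 0
--     paren_count = 0
--     bracket_count = 0
--     func_start = -1
--     if_start = -1
--
--     for i in range(start_line, min(end_line, len(lines))):
--         line = lines[i]
--         stripped = line.strip()
--
--         # 检查函数定义
--         if 'func ' in line and '{' in line:
--             func_start = i
--             brace_count = 0
--
--         # 检查if语句
--         if stripped.startswith('if ') and '{' in line:
--             if_start = i
--
--         # 计数括号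
--         brace_count += line.count('{') - line.count('}')
--         paren_count += line.count('(') - line.count(')')
--         bracket_count += line.count('[') - line.count(']')
--
--     return {
--         'brace_count': brace_count,
--         'paren_count': paren_count,
--         'bracket_count': bracket_count,
--         'func_start': func_start,
--         'if_start': if_start
--     }
-- ===== SOURCE B (Python) =====
-- def find_unclosed_structure(start_line, end_line, lines):
--     """Position-finding pass, then separate full/suffix sums (no fused reset-loop)."""
--     end = min(end_line, len(lines))
--     func_start = -1
--     if_start = -1
--     brace_start = start_line
--     for i in range(start_line, end):
--         line = lines[i]
--         if 'func ' in line and '{' in line: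
--             func_start = i
--             brace_start = i
--         if line.strip().startswith('if ') and '{' in line:
--             if_start = i
--     paren_count = sum(lines[i].count('(') - lines[i].count(')') for i in range(start_line, end))
--     bracket_count = sum(lines[i].count('[') - lines[i].count(']') for i in range(start_line, end))
--     brace_count = sum(lines[i].count('{') - lines[i].count('}') for i in range(brace_start, end))
--     return {
--         'brace_count': brace_count,
--         'paren_count': paren_count,
--         'bracket_count': bracket_count,
--         'func_start': func_start,
--         'if_start': if_start
--     }
-- ===== Notes on version B (the rewrite author's own statement) =====
-- stated objective: alternative
-- what changed: Replaces A's single fused loop with a brace-count-reset trick by a position-finding pass (recording the restart index) followed by three separate sums: full-range sums for parens/brackets and a suffix sum from the last 'func {' line (or start_line) for braces.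
import Mathlib
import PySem

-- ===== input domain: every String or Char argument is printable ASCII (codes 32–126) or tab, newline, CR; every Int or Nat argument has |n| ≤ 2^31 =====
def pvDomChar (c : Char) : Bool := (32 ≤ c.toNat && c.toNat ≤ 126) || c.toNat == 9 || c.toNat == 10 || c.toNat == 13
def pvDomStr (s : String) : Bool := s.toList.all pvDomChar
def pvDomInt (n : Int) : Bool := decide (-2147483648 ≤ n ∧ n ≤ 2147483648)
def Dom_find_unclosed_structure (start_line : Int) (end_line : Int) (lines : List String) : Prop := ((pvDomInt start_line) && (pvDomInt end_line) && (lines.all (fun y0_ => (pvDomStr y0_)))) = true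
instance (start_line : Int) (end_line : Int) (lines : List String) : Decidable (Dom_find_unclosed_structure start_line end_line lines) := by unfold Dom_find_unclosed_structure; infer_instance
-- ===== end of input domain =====

-- B re-decomposes A's fused reset-loop into a position pass plus separate full/suffix sums; return value only, no mutation.

-- shared per-line helpers (used by both ports)
def pvL (lines : List String) (i : Int) : String := PySem.List.pyGetD lines i ""
def pvCnt (line : String) (o c : String) : Int := (PySem.Str.count line o : Int) - (PySem.Str.count line c : Int)
def pvCf (line : String) : Bool := PySem.Str.isIn "func " line && PySem.Str.isIn "{" line
def pvCi (line : String) : Bool := PySem.Str.startswith (PySem.Str.strip line) "if " && PySem.Str.isIn "{" line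

-- ===== PORT A =====
-- literal port of A: one fold over range(start_line, min(end_line, len(lines))) carrying
-- (brace_count, paren_count, bracket_count, func_start, if_start); brace_count reset to 0 on 'func '-lines.
-- lines[i] is ported as pyGetD (Pre_ guarantees the index is in range).
def find_unclosed_structure (start_line : Int) (end_line : Int) (lines : List String) : List (String × Int) :=
  let st := (PySem.List.pyRange start_line (min end_line (lines.length : Int)) 1).foldl
      (fun (s : Int × Int × Int × Int × Int) i =>
        let line := pvL lines i
        ((if pvCf line then 0 else s.1) + pvCnt line "{" "}",
         s.2.1 + pvCnt line "(" ")",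
         s.2.2.1 + pvCnt line "[" "]",
         if pvCf line then i else s.2.2.2.1,
         if pvCi line then i else s.2.2.2.2))
      (0, 0, 0, -1, -1)
  [("brace_count", st.1), ("paren_count", st.2.1), ("bracket_count", st.2.2.1),
   ("func_start", st.2.2.2.1), ("if_start", st.2.2.2.2)]

-- ===== PORT B =====
-- literal port of B: position pass (func_start, if_start, brace_start), then three sum passes.
def find_unclosed_structure_alt (start_line : Int) (end_line : Int) (lines : List String) : List (String × Int) :=
  let e := min end_line (lines.length : Int)
  let pos := (PySem.List.pyRange start_line e 1).foldl
      (fun (s : Int × Int × Int) i =>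
        let line := pvL lines i
        (if pvCf line then i else s.1,
         if pvCi line then i else s.2.1,
         if pvCf line then i else s.2.2))
      (-1, -1, start_line)
  let paren_count := (PySem.List.pyRange start_line e 1).foldl (fun a i => a + pvCnt (pvL lines i) "(" ")") 0
  let bracket_count := (PySem.List.pyRange start_line e 1).foldl (fun a i => a + pvCnt (pvL lines i) "[" "]") 0
  let brace_count := (PySem.List.pyRange pos.2.2 e 1).foldl (fun a i => a + pvCnt (pvL lines i) "{" "}") 0
  [("brace_count", brace_count), ("paren_count", paren_count), ("bracket_count", bracket_count),
   ("func_start", pos.1), ("if_start", pos.2.1)]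

-- ===== PRECONDITION & SPEC =====
-- Pre_ excludes exactly the inputs where A raises IndexError: a nonempty range starting below -len(lines).
def Pre_find_unclosed_structure (start_line : Int) (end_line : Int) (lines : List String) : Prop :=
  min end_line (lines.length : Int) ≤ start_line ∨ -(lines.length : Int) ≤ start_line
instance (start_line : Int) (end_line : Int) (lines : List String) : Decidable (Pre_find_unclosed_structure start_line end_line lines) := by unfold Pre_find_unclosed_structure; infer_instance
def pvWitness_find_unclosed_structure : Int × Int × List String := (0, 2, ["func f() {", "  if a {"])
def Spec_find_unclosed_structure (start_line : Int) (end_line : Int) (lines : List String) (out : List (String × Int)) : Prop := out = find_unclosed_structure_alt start_line end_line lines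
instance (start_line : Int) (end_line : Int) (lines : List String) (out : List (String × Int)) : Decidable (Spec_find_unclosed_structure start_line end_line lines out) := by unfold Spec_find_unclosed_structure; infer_instance

-- ===== CLAIM =====
def Claim_equal_find_unclosed_structure : Prop := ∀ (start_line : Int) (end_line : Int) (lines : List String), Dom_find_unclosed_structure start_line end_line lines → Pre_find_unclosed_structure start_line end_line lines → Spec_find_unclosed_structure start_line end_line lines (find_unclosed_structure start_line end_line lines)

-- ===== LEMMAS AND PROOFS =====

-- A's fused fold, split by component
lemma pvAfold (lines : List String) (l : List Int) (bc pc kc fs ifs : Int) :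
    l.foldl (fun (s : Int × Int × Int × Int × Int) i =>
        let line := pvL lines i
        ((if pvCf line then 0 else s.1) + pvCnt line "{" "}",
         s.2.1 + pvCnt line "(" ")",
         s.2.2.1 + pvCnt line "[" "]",
         if pvCf line then i else s.2.2.2.1,
         if pvCi line then i else s.2.2.2.2)) (bc, pc, kc, fs, ifs)
    = (l.foldl (fun a i => (if pvCf (pvL lines i) then 0 else a) + pvCnt (pvL lines i) "{" "}") bc,
       pc + (l.map (fun i => pvCnt (pvL lines i) "(" ")")).sum,
       kc + (l.map (fun i => pvCnt (pvL lines i) "[" "]")).sum,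
       l.foldl (fun a i => if pvCf (pvL lines i) then i else a) fs,
       l.foldl (fun a i => if pvCi (pvL lines i) then i else a) ifs) := by
  induction l generalizing bc pc kc fs ifs with
  | nil => simp
  | cons x t ih =>
    simp only [List.foldl_cons, List.map_cons, List.sum_cons]
    rw [ih]
    simp only [Prod.mk.injEq, true_and, and_true]
    constructor <;> ring

-- B's position fold, split by component
lemma pvBfold (lines : List String) (l : List Int) (fs ifs bs : Int) :
    l.foldl (fun (s : Int × Int × Int) i =>
        let line := pvL lines i
        (if pvCf line then i else s.1,
         if pvCi line then i else s.2.1,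
         if pvCf line then i else s.2.2)) (fs, ifs, bs)
    = (l.foldl (fun a i => if pvCf (pvL lines i) then i else a) fs,
       l.foldl (fun a i => if pvCi (pvL lines i) then i else a) ifs,
       l.foldl (fun a i => if pvCf (pvL lines i) then i else a) bs) := by
  induction l generalizing fs ifs bs with
  | nil => simp
  | cons x t ih => simp only [List.foldl_cons]; rw [ih]

lemma pvPos_nomatch (lines : List String) (l : List Int) (a : Int)
    (h : ∀ i ∈ l, pvCf (pvL lines i) = false) :
    l.foldl (fun a i => if pvCf (pvL lines i) then i else a) a = a := by
  induction l generalizing a with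
  | nil => rfl
  | cons x t ih =>
    simp only [List.foldl_cons, h x List.mem_cons_self, Bool.false_eq_true, ite_false]
    exact ih a (fun i hi => h i (List.mem_cons_of_mem x hi))

lemma pvBrace_nomatch (lines : List String) (l : List Int) (bc : Int)
    (h : ∀ i ∈ l, pvCf (pvL lines i) = false) :
    l.foldl (fun a i => (if pvCf (pvL lines i) then 0 else a) + pvCnt (pvL lines i) "{" "}") bc
      = bc + (l.map (fun i => pvCnt (pvL lines i) "{" "}")).sum := by
  induction l generalizing bc with
  | nil => simp
  | cons x t ih =>
    simp only [List.foldl_cons, List.map_cons, List.sum_cons, h x List.mem_cons_self,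
      Bool.false_eq_true, ite_false]
    rw [ih (bc + pvCnt (pvL lines x) "{" "}") (fun i hi => h i (List.mem_cons_of_mem x hi))]
    ring

lemma pvPos_indep (lines : List String) (l : List Int) (a a' : Int)
    (h : ∃ i ∈ l, pvCf (pvL lines i) = true) :
    l.foldl (fun a i => if pvCf (pvL lines i) then i else a) a
      = l.foldl (fun a i => if pvCf (pvL lines i) then i else a) a' := by
  induction l generalizing a a' with
  | nil => exact absurd h (by simp)
  | cons x t ih =>
    simp only [List.foldl_cons]
    by_cases hx : pvCf (pvL lines x) = true
    · simp [hx]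
    · by_cases ht : ∃ i ∈ t, pvCf (pvL lines i) = true
      · simp only [hx]
        exact ih _ _ ht
      · rcases h with ⟨i, hi, hci⟩
        rcases List.mem_cons.mp hi with rfl | hit
        · exact absurd hci hx
        · exact absurd ⟨i, hit, hci⟩ ht

-- Main brace lemma: A's reset-fold over range(s,e) from bc equals the suffix sum from the
-- last func-line (computed by B's position fold with initial value s), plus bc if no func-line.
lemma pvBrace_main (lines : List String) (e : Int) : ∀ (n : Nat) (s bc : Int), (e - s).toNat ≤ n →
    (PySem.List.pyRange s e 1).foldl
        (fun a i => (if pvCf (pvL lines i) then 0 else a) + pvCnt (pvL lines i) "{" "}") bc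
    = (if (PySem.List.pyRange s e 1).any (fun i => pvCf (pvL lines i)) then 0 else bc)
      + ((PySem.List.pyRange ((PySem.List.pyRange s e 1).foldl
            (fun a i => if pvCf (pvL lines i) then i else a) s) e 1).map
          (fun i => pvCnt (pvL lines i) "{" "}")).sum := by
  intro n
  induction n with
  | zero =>
    intro s bc h
    have hse : e ≤ s := by omega
    simp [PySem.List.pyRange_one_eq_nil hse]
  | succ n ih =>
    intro s bc h
    by_cases hse : e ≤ s
    · simp [PySem.List.pyRange_one_eq_nil hse]
    · have hlt : s < e := by omega
      rw [PySem.List.pyRange_one_cons hlt]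
      simp only [List.foldl_cons, List.any_cons, ite_self]
      by_cases hany : ∃ i ∈ PySem.List.pyRange (s + 1) e 1, pvCf (pvL lines i) = true
      · have hany' : (PySem.List.pyRange (s + 1) e 1).any (fun i => pvCf (pvL lines i)) = true := by
          simpa [List.any_eq_true] using hany
        rw [ih (s + 1) _ (by omega)]
        rw [pvPos_indep lines _ s (s + 1) hany]
        simp [hany']
      · have hall : ∀ i ∈ PySem.List.pyRange (s + 1) e 1, pvCf (pvL lines i) = false := by
          intro i hi
          by_contra hc
          exact hany ⟨i, hi, by simpa using hc⟩
        have hany' : (PySem.List.pyRange (s + 1) e 1).any (fun i => pvCf (pvL lines i)) = false := by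
          simp only [List.any_eq_false]
          intro i hi; simp [hall i hi]
        rw [pvBrace_nomatch lines _ _ hall, pvPos_nomatch lines _ s hall]
        rw [PySem.List.pyRange_one_cons hlt]
        simp only [List.map_cons, List.sum_cons, hany', Bool.or_false]
        by_cases hx : pvCf (pvL lines s) = true
        · simp only [hx, ite_true]; ring
        · simp only [eq_false_of_ne_true hx, Bool.false_eq_true, ite_false]; ring

-- ===== VERDICT =====
theorem find_unclosed_structure_spec : Claim_equal_find_unclosed_structure := by
  intro start_line end_line lines _ _
  unfold Spec_find_unclosed_structure find_unclosed_structure find_unclosed_structure_alt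
  dsimp only
  rw [pvAfold, pvBfold]
  rw [pvBrace_main lines (min end_line (lines.length : Int))
        ((min end_line (lines.length : Int)) - start_line).toNat start_line 0 le_rfl]
  rw [PySem.List.foldl_add, PySem.List.foldl_add, PySem.List.foldl_add]
  simp
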